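-- pv_equiv track=rewrite | github.com/alazarlemma02/A2SV | A2SV Remote Contest #7 06-Apr-2025/C - The Quantum Canyon Conundrum 327343.py | solve
-- ===== SOURCE A (Python) =====
-- def solve(n, a):
--
--     new_a = [a[0]]
--     for i in range(n):
--         if new_a[-1] != a[i]:
--             new_a.append(a[i])
--
--     cnt_canyon = 0
--     k = len(new_a)
--     if k == 1 or k ==2:
--         return "YES"
--     for i in range(k):
--         if i == 0 and new_a[i+1] > new_a[i]:
--             cnt_canyon += 1
--         elif i == k-1 and new_a[i-1] > new_a[i]:
--             cnt_canyon +=1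
--         else:
--             if new_a[i-1] > new_a[i] and new_a[i] < new_a[i+1]:
--                 cnt_canyon +=1
--     if cnt_canyon != 1:
--         return "NO"
--     return "YES"
-- ===== SOURCE B (Python) =====
-- def solve(n, a):
--     new_a = [a[0]]
--     for i in range(n):
--         if new_a[-1] != a[i]:
--             new_a.append(a[i])
--     k = len(new_a)
--     j = 0
--     while j + 1 < k and new_a[j] > new_a[j + 1]:
--         j += 1
--     while j + 1 < k and new_a[j] < new_a[j + 1]:
--         j += 1
--     return "YES" if j == k - 1 else "NO"
-- ===== Notes on version B (the rewrite author's own statement) =====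
-- stated objective: simpler
-- what changed: The dedup pass is kept, but the local-minimum counting loop over all indices (with boundary branches and negative-index wraparound) is replaced by a two-phase pointer scan: walk down the strictly decreasing prefix, then up the strictly increasing rest, and answer YES iff the scan reaches the last index; the k<=2 early return disappears because the scan handles it.
import Mathlib
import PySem

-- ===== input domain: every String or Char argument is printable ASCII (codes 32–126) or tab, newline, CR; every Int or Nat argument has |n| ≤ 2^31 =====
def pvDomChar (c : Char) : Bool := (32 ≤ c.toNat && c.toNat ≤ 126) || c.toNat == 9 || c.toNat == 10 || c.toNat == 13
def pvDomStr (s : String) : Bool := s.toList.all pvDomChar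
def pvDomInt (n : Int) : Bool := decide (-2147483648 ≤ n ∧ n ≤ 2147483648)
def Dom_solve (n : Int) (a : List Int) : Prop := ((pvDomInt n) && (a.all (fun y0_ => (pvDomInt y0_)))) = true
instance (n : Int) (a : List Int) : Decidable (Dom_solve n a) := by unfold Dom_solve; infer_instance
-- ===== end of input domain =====

-- B keeps A's consecutive-dedup pass verbatim, but replaces the local-minimum counting loop by a
-- two-phase pointer scan (descend, then ascend, check the scan reaches the last index); same O(n) cost.

-- ===== PORT A =====
-- the dedup pass, identical source text in A and in B, so one shared transliteration:
-- a[i] raises IndexError when i ≥ len(a) (excluded by Pre_solve); the none branch is that dead case.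
def dedupStep (a : List Int) (st : List Int) (i : Int) : List Int :=
  match PySem.List.pyGet? a i with
  | some x => if PySem.List.pyGet? st (-1) ≠ some x then st ++ [x] else st
  | none => st

-- new_a = [a[0]] (a[0] raises IndexError on empty a, excluded by Pre_solve) then the dedup loop
def dedup (n : Int) (a : List Int) : List Int :=
  (PySem.List.pyRange 0 n 1).foldl (dedupStep a) [a.headD 0]

-- the body of A's counting loop; Python short-circuits `and`, so new_a[i+1] is never read out of
-- range there — here pyGetD's default may be read in that case, but the conjunction is already false.
def bodyA (L : List Int) (k : Int) (c : Int) (i : Int) : Int :=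
  if i = 0 ∧ PySem.List.pyGetD L (i+1) 0 > PySem.List.pyGetD L i 0 then c + 1
  else if i = k - 1 ∧ PySem.List.pyGetD L (i-1) 0 > PySem.List.pyGetD L i 0 then c + 1
  else if PySem.List.pyGetD L (i-1) 0 > PySem.List.pyGetD L i 0 ∧
          PySem.List.pyGetD L i 0 < PySem.List.pyGetD L (i+1) 0 then c + 1
  else c

def solve (n : Int) (a : List Int) : String :=
  let new_a := dedup n a
  let k : Int := new_a.length
  if k = 1 ∨ k = 2 then "YES"
  else
    let cnt := (PySem.List.pyRange 0 k 1).foldl (bodyA new_a k) 0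
    if cnt ≠ 1 then "NO" else "YES"

-- ===== PORT B =====
-- while j + 1 < k and new_a[j] > new_a[j+1]: j += 1
def scanDown (L : List Int) (k : Int) (j : Int) : Int :=
  if h : j + 1 < k ∧ PySem.List.pyGetD L j 0 > PySem.List.pyGetD L (j+1) 0 then
    scanDown L k (j + 1)
  else j
termination_by (k - j).toNat
decreasing_by omega

-- while j + 1 < k and new_a[j] < new_a[j+1]: j += 1
def scanUp (L : List Int) (k : Int) (j : Int) : Int :=
  if h : j + 1 < k ∧ PySem.List.pyGetD L j 0 < PySem.List.pyGetD L (j+1) 0 then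
    scanUp L k (j + 1)
  else j
termination_by (k - j).toNat
decreasing_by omega

def solve_alt (n : Int) (a : List Int) : String :=
  let new_a := dedup n a
  let k : Int := new_a.length
  let j := scanUp new_a k (scanDown new_a k 0)
  if j = k - 1 then "YES" else "NO"

-- ===== PRECONDITION & SPEC =====
-- A raises IndexError on a = [] (new_a = [a[0]]) and when n > len(a) (a[i] in the dedup loop);
-- Pre_solve excludes exactly those inputs.
def Pre_solve (n : Int) (a : List Int) : Prop := a ≠ [] ∧ n ≤ (a.length : Int)
instance (n : Int) (a : List Int) : Decidable (Pre_solve n a) := by unfold Pre_solve; infer_instance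

def pvWitness_solve : Int × List Int := (3, [2, 1, 2])

def Spec_solve (n : Int) (a : List Int) (out : String) : Prop := out = solve_alt n a
instance (n : Int) (a : List Int) (out : String) : Decidable (Spec_solve n a out) := by unfold Spec_solve; infer_instance

-- ===== CLAIM (what is proved, stated in full; the proofs are below) =====
def Claim_equal_solve : Prop := ∀ (n : Int) (a : List Int), Dom_solve n a → Pre_solve n a → Spec_solve n a (solve n a)

-- ===== LEMMAS AND PROOFS =====

-- "strictly increasing from here on"
def upF : List Int → Bool
  | x :: y :: t => decide (x < y) && upF (y :: t)
  | _ => true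

-- "valley: strictly decreasing prefix then strictly increasing rest"
def downF : List Int → Bool
  | x :: y :: t => if x > y then downF (y :: t) else upF (x :: y :: t)
  | _ => true

-- number of local minima A's loop counts on the suffix, p = previous element
def mid (p : Int) : List Int → Int
  | [] => 0
  | [x] => if p > x then 1 else 0
  | x :: y :: t => (if p > x ∧ x < y then 1 else 0) + mid x (y :: t)

lemma dedupStep_pres (a st : List Int) (i : Int) (h1 : st ≠ []) (h2 : List.IsChain (· ≠ ·) st) :
    dedupStep a st i ≠ [] ∧ List.IsChain (· ≠ ·) (dedupStep a st i) := by
  unfold dedupStep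
  cases hg : PySem.List.pyGet? a i with
  | none => exact ⟨h1, h2⟩
  | some x =>
    dsimp only
    by_cases hc : PySem.List.pyGet? st (-1) ≠ some x
    · rw [if_pos hc]
      refine ⟨by simp, ?_⟩
      rw [List.isChain_append]
      refine ⟨h2, by simp, ?_⟩
      intro u hu y hy
      simp at hy; subst hy
      rw [PySem.List.pyGet?_neg_one] at hc
      intro he; exact hc (by rw [hu, he])
    · rw [if_neg hc]; exact ⟨h1, h2⟩

lemma dedup_ok (n : Int) (a : List Int) :
    dedup n a ≠ [] ∧ List.IsChain (· ≠ ·) (dedup n a) := by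
  unfold dedup
  generalize PySem.List.pyRange 0 n 1 = l
  have : ∀ (l : List Int) (st : List Int), st ≠ [] → List.IsChain (· ≠ ·) st →
      l.foldl (dedupStep a) st ≠ [] ∧ List.IsChain (· ≠ ·) (l.foldl (dedupStep a) st) := by
    intro l
    induction l with
    | nil => intro st h1 h2; exact ⟨h1, h2⟩
    | cons i l ih =>
      intro st h1 h2
      obtain ⟨h1', h2'⟩ := dedupStep_pres a st i h1 h2
      exact ih _ h1' h2'
  exact this l [a.headD 0] (by simp) (by simp [List.isChain_cons])

lemma mid_nonneg : ∀ (t : List Int) (p : Int), 0 ≤ mid p t := by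
  intro t
  induction t with
  | nil => intro p; simp [mid]
  | cons x t ih =>
    intro p
    cases t with
    | nil => simp [mid]; split <;> omega
    | cons y t' =>
      have := ih x
      simp only [mid]
      split <;> omega

lemma mid_pos : ∀ (t : List Int) (x p : Int), x < p → List.IsChain (· ≠ ·) (x :: t) →
    1 ≤ mid p (x :: t) := by
  intro t
  induction t with
  | nil => intro x p hp _; simp [mid, hp]
  | cons y t' ih =>
    intro x p hp hc
    rw [List.isChain_cons_cons] at hc
    obtain ⟨hxy, hc'⟩ := hc
    simp only [mid]
    by_cases hd : y < x
    · have := ih y x hd hc'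
      split <;> omega
    · have hlt : x < y := by omega
      have h1 : (if x < p ∧ x < y then (1:Int) else 0) = 1 := by simp [hp, hlt]
      have := mid_nonneg (y :: t') x
      omega

lemma mid_zero_iff : ∀ (t : List Int) (x p : Int), p < x → List.IsChain (· ≠ ·) (x :: t) →
    (mid p (x :: t) = 0 ↔ upF (x :: t) = true) := by
  intro t
  induction t with
  | nil => intro x p hp _; simp [mid, upF]; omega
  | cons y t' ih =>
    intro x p hp hc
    rw [List.isChain_cons_cons] at hc
    obtain ⟨hxy, hc'⟩ := hc
    have hnp : ¬ (x < p ∧ x < y) := by omega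
    simp only [mid, hnp, if_false, zero_add, upF]
    by_cases hlt : x < y
    · rw [ih y x hlt hc']
      simp [hlt]
    · have hd : y < x := by omega
      have := mid_pos t' y x hd hc'
      constructor
      · intro h; omega
      · intro h; simp [hlt] at h

lemma mid_one_iff : ∀ (t : List Int) (x p : Int), x < p → List.IsChain (· ≠ ·) (x :: t) →
    (mid p (x :: t) = 1 ↔ downF (x :: t) = true) := by
  intro t
  induction t with
  | nil => intro x p hp _; simp [mid, hp, downF]
  | cons y t' ih =>
    intro x p hp hc
    rw [List.isChain_cons_cons] at hc
    obtain ⟨hxy, hc'⟩ := hc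
    by_cases hd : y < x
    · have hnc : ¬ (x < p ∧ x < y) := by omega
      simp only [mid, hnc, if_false, zero_add]
      rw [ih y x hd hc']
      simp only [downF]
      rw [if_pos (by omega)]
    · have hlt : x < y := by omega
      have hcnd : (x < p ∧ x < y) := ⟨hp, hlt⟩
      have e1 : mid p (x :: y :: t') = (if x < p ∧ x < y then (1:Int) else 0) + mid x (y :: t') := rfl
      rw [e1, if_pos hcnd]
      rw [show (1:Int) + mid x (y :: t') = 1 ↔ mid x (y :: t') = 0 by omega]
      rw [mid_zero_iff t' y x hlt hc']
      simp only [downF]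
      rw [if_neg (by omega)]
      simp [upF, hlt]

lemma cnt_one_iff (x y : Int) (t : List Int) (hc : List.IsChain (· ≠ ·) (x :: y :: t)) :
    ((if x < y then (1:Int) else 0) + mid x (y :: t) = 1 ↔ downF (x :: y :: t) = true) := by
  rw [List.isChain_cons_cons] at hc
  obtain ⟨hxy, hc'⟩ := hc
  by_cases hlt : x < y
  · rw [if_pos hlt]
    rw [show (1:Int) + mid x (y :: t) = 1 ↔ mid x (y :: t) = 0 by omega]
    rw [mid_zero_iff t y x hlt hc']
    simp only [downF]
    rw [if_neg (by omega)]
    simp [upF, hlt]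
  · have hd : y < x := by omega
    rw [if_neg hlt, zero_add]
    rw [mid_one_iff t y x hd hc']
    simp only [downF]
    rw [if_pos (by omega)]

lemma downF_short (L : List Int) (hc : List.IsChain (· ≠ ·) L) (h : L.length ≤ 2) :
    downF L = true := by
  match L with
  | [] => rfl
  | [x] => rfl
  | [x, y] =>
    rw [List.isChain_cons_cons] at hc
    simp only [downF]
    by_cases hd : y < x
    · rw [if_pos hd]
    · rw [if_neg hd]
      have : x < y := by have := hc.1; omega
      simp [upF, this]
  | x :: y :: z :: t => simp at h

-- bridge for A's fold: the suffix from index j (1 ≤ j < len L) contributes mid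
lemma foldA_suffix (L : List Int) :
    ∀ (m j : Nat) (c : Int), L.length - j = m → 1 ≤ j → j < L.length →
    (PySem.List.pyRange (j : Int) (L.length : Int) 1).foldl (bodyA L (L.length : Int)) c =
      c + mid (L.getD (j-1) 0) (L.drop j) := by
  intro m
  induction m with
  | zero => intro j c hm h1 h2; omega
  | succ m ih =>
    intro j c hm h1 h2
    have hjlt : (j : Int) < (L.length : Int) := by exact_mod_cast h2
    rw [PySem.List.pyRange_one_cons hjlt]
    rw [List.foldl_cons]
    have hx : L.getD j 0 = L[j]'h2 := List.getD_eq_getElem _ _ h2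
    have hdropj : L.drop j = L[j]'h2 :: L.drop (j+1) := List.drop_eq_getElem_cons h2
    have hij : ((j : Int)) - 1 = ((j - 1 : Nat) : Int) := by omega
    have hij2 : ((j : Int)) + 1 = ((j + 1 : Nat) : Int) := by omega
    have hb0 : ¬ ((j : Int) = 0) := by omega
    by_cases hlast : j + 1 = L.length
    · -- last index
      have hrest : PySem.List.pyRange ((j : Int) + 1) (L.length : Int) 1 = [] :=
        PySem.List.pyRange_one_eq_nil (by omega)
      rw [hrest, List.foldl_nil]
      have hdrop1 : L.drop (j+1) = [] := List.drop_eq_nil_of_le (by omega)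
      rw [hdropj, hdrop1]
      simp only [mid]
      unfold bodyA
      rw [if_neg (fun h => hb0 h.1)]
      simp only [hij, hij2, PySem.List.pyGetD_natCast, hx]
      have hlastI : ((j : Int)) = (L.length : Int) - 1 := by omega
      by_cases hcnd : L[j]'h2 < L.getD (j-1) 0
      · rw [if_pos ⟨hlastI, hcnd⟩, if_pos hcnd]
      · rw [if_neg (fun h => hcnd h.2), if_neg (fun h => hcnd h.1), if_neg hcnd]; omega
    · -- middle index
      have h2' : j + 1 < L.length := by omega
      have hy : L.getD (j+1) 0 = L[j+1]'h2' := List.getD_eq_getElem _ _ h2'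
      have hdropj1 : L.drop (j+1) = L[j+1]'h2' :: L.drop (j+2) := List.drop_eq_getElem_cons h2'
      have step : bodyA L (L.length : Int) c (j : Int) =
          c + (if L.getD (j-1) 0 > L.getD j 0 ∧ L.getD j 0 < L.getD (j+1) 0 then 1 else 0) := by
        unfold bodyA
        rw [if_neg (fun h => hb0 h.1)]
        rw [if_neg (by intro h; omega)]
        simp only [hij, hij2, PySem.List.pyGetD_natCast]
        split <;> omega
      rw [step, hij2]
      rw [ih (j+1) _ (by omega) (by omega) h2']
      rw [hdropj, hdropj1]
      simp only [mid]
      rw [show (j + 1 - 1 : Nat) = j from by omega, hx, ← hdropj1]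
      rw [hy]
      split <;> omega

lemma foldA_top (L : List Int) (h3 : 3 ≤ L.length) :
    (PySem.List.pyRange 0 (L.length : Int) 1).foldl (bodyA L (L.length : Int)) 0 =
      (if L.getD 0 0 < L.getD 1 0 then (1:Int) else 0) + mid (L.getD 0 0) (L.drop 1) := by
  have h0 : (0 : Int) < (L.length : Int) := by omega
  rw [PySem.List.pyRange_one_cons h0, List.foldl_cons]
  have step : bodyA L (L.length : Int) 0 0 = (if L.getD 0 0 < L.getD 1 0 then (1:Int) else 0) := by
    unfold bodyA
    simp only [zero_add, show (0:Int) - 1 = -1 from rfl]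
    rw [show PySem.List.pyGetD L (1:Int) 0 = L.getD 1 0 from by
          rw [show (1:Int) = ((1:Nat):Int) from rfl, PySem.List.pyGetD_natCast],
        show PySem.List.pyGetD L (0:Int) 0 = L.getD 0 0 from by
          rw [show (0:Int) = ((0:Nat):Int) from rfl, PySem.List.pyGetD_natCast]]
    by_cases hcnd : L.getD 0 0 < L.getD 1 0
    · rw [if_pos ⟨trivial, hcnd⟩, if_pos hcnd]
    · rw [if_neg (fun h => hcnd h.2), if_neg (by intro h; omega), if_neg (fun h => hcnd h.2),
          if_neg hcnd]
  rw [show (0:Int) + 1 = ((1:Nat):Int) from rfl]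
  rw [foldA_suffix L (L.length - 1) 1 _ (by omega) (by omega) (by omega)]
  rw [step]

-- bridge for B's scans
lemma scanUp_eq (L : List Int) :
    ∀ (m j : Nat), L.length - j = m → j < L.length →
    (scanUp L (L.length : Int) (j : Int) = (L.length : Int) - 1 ↔ upF (L.drop j) = true) := by
  intro m
  induction m with
  | zero => intro j hm h2; omega
  | succ m ih =>
    intro j hm h2
    rw [scanUp]
    have hx : L.getD j 0 = L[j]'h2 := List.getD_eq_getElem _ _ h2
    have hdropj : L.drop j = L[j]'h2 :: L.drop (j+1) := List.drop_eq_getElem_cons h2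
    by_cases hlast : j + 1 = L.length
    · rw [dif_neg (by intro h; omega)]
      have hdrop1 : L.drop (j+1) = [] := List.drop_eq_nil_of_le (by omega)
      rw [hdropj, hdrop1]
      exact ⟨fun _ => rfl, fun _ => by omega⟩
    · have h2' : j + 1 < L.length := by omega
      have hy : L.getD (j+1) 0 = L[j+1]'h2' := List.getD_eq_getElem _ _ h2'
      have hdropj1 : L.drop (j+1) = L[j+1]'h2' :: L.drop (j+2) := List.drop_eq_getElem_cons h2'
      have hij2 : ((j : Int)) + 1 = ((j + 1 : Nat) : Int) := by omega
      simp only [hij2, PySem.List.pyGetD_natCast]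
      by_cases hcnd : L.getD j 0 < L.getD (j+1) 0
      · rw [dif_pos ⟨by omega, hcnd⟩]
        rw [ih (j+1) (by omega) h2']
        rw [hdropj, hdropj1]
        simp only [upF, ← hdropj1]
        rw [hx, hy] at hcnd
        simp [hcnd]
      · rw [dif_neg (fun h => hcnd h.2)]
        rw [hdropj, hdropj1]
        simp only [upF, ← hdropj1]
        rw [hx, hy] at hcnd
        constructor
        · intro h; omega
        · intro h; simp [hcnd] at h
    

lemma scanDown_eq (L : List Int) :
    ∀ (m j : Nat), L.length - j = m → j < L.length →
    (scanUp L (L.length : Int) (scanDown L (L.length : Int) (j : Int)) = (L.length : Int) - 1 ↔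
      downF (L.drop j) = true) := by
  intro m
  induction m with
  | zero => intro j hm h2; omega
  | succ m ih =>
    intro j hm h2
    rw [scanDown]
    have hx : L.getD j 0 = L[j]'h2 := List.getD_eq_getElem _ _ h2
    have hdropj : L.drop j = L[j]'h2 :: L.drop (j+1) := List.drop_eq_getElem_cons h2
    by_cases hlast : j + 1 = L.length
    · rw [dif_neg (by intro h; omega)]
      have hdrop1 : L.drop (j+1) = [] := List.drop_eq_nil_of_le (by omega)
      rw [scanUp_eq L (L.length - j) j (by omega) h2]
      rw [hdropj, hdrop1]
      simp [upF, downF]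
    · have h2' : j + 1 < L.length := by omega
      have hy : L.getD (j+1) 0 = L[j+1]'h2' := List.getD_eq_getElem _ _ h2'
      have hdropj1 : L.drop (j+1) = L[j+1]'h2' :: L.drop (j+2) := List.drop_eq_getElem_cons h2'
      have hij2 : ((j : Int)) + 1 = ((j + 1 : Nat) : Int) := by omega
      simp only [hij2, PySem.List.pyGetD_natCast]
      by_cases hcnd : L.getD (j+1) 0 < L.getD j 0
      · rw [dif_pos ⟨by omega, hcnd⟩]
        rw [ih (j+1) (by omega) h2']
        rw [hdropj, hdropj1]
        simp only [downF, ← hdropj1]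
        rw [hx, hy] at hcnd
        rw [if_pos hcnd]
      · rw [dif_neg (fun h => hcnd h.2)]
        rw [scanUp_eq L (L.length - j) j (by omega) h2]
        rw [hdropj, hdropj1]
        simp only [downF, ← hdropj1]
        rw [hx, hy] at hcnd
        rw [if_neg hcnd]

-- ===== VERDICT (by name: the statement is the Claim_ definition above) =====
theorem solve_spec : Claim_equal_solve := by
  intro n a _ _
  unfold Spec_solve solve solve_alt
  obtain ⟨hne, hch⟩ := dedup_ok n a
  generalize hg : dedup n a = L at hne hch ⊢
  have hlen1 : 1 ≤ L.length := by
    cases L with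
    | nil => exact absurd rfl hne
    | cons x t => simp
  have hscan := scanDown_eq L L.length 0 (by omega) (by omega)
  simp only [Nat.cast_zero, List.drop_zero] at hscan
  by_cases hsmall : L.length ≤ 2
  · -- A's early YES; B's scan also reaches the end
    rw [if_pos (by omega)]
    rw [if_pos (hscan.mpr (downF_short L hch hsmall))]
  · -- k ≥ 3
    have h3 : 3 ≤ L.length := by omega
    rw [if_neg (by omega)]
    obtain ⟨x, y, t, rfl⟩ : ∃ x y t, L = x :: y :: t := by
      match L, h3 with
      | x :: y :: t, _ => exact ⟨x, y, t, rfl⟩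
    rw [foldA_top (x :: y :: t) h3]
    have hcnt := cnt_one_iff x y t hch
    have hg0 : (x :: y :: t).getD 0 0 = x := rfl
    have hg1 : (x :: y :: t).getD 1 0 = y := rfl
    have hd1 : (x :: y :: t).drop 1 = y :: t := rfl
    rw [hg0, hg1, hd1]
    by_cases hdown : downF (x :: y :: t) = true
    · rw [if_neg (by simpa using hcnt.mpr hdown), if_pos (hscan.mpr hdown)]
    · rw [if_pos (by intro h; exact hdown (hcnt.mp h))]
      rw [if_neg (fun h => hdown (hscan.mp h))]
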